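-- pv_equiv track=rewrite | github.com/manwar/perlweeklychallenge-club | challenge-238/roger-bell-west/python/ch-2.py | persistencearray
-- ===== SOURCE A (Python) =====
-- def persistence(a):
--   steps = 0
--   b = a
--   while b > 9:
--     steps += 1
--     p = 1
--     while b > 0:
--       p *= b % 10
--       b //= 10
--     b = p
--   return steps
--
-- def persistencearray(a):
--   c = dict()
--   for i in a:
--     c[i] = persistence(i)
--   b = a
--   b.sort()
--   b.sort(key = lambda i: c[i])
--   return b
-- ===== SOURCE B (Python) =====
-- # B: persistence as its natural recurrence; one in-place sort with a composite
-- # (persistence, value) key replaces A's two sequential stable sorts.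
-- # Like A, this sorts the caller's list in place and returns it.
--
-- def prod_digits(n):
--     return n if n < 10 else (n % 10) * prod_digits(n // 10)
--
--
-- def persistence(n):
--     if n <= 9:
--         return 0
--     return 1 + persistence(prod_digits(n))
--
--
-- def persistencearray(a):
--     a.sort(key=lambda i: (persistence(i), i))
--     return a
-- ===== Notes on version B (the rewrite author's own statement) =====
-- stated objective: simpler
-- what changed: persistence becomes its natural recurrence (0 for single-digit, else 1 + persistence of the digit product, itself recursive) instead of two nested while loops, and the value->persistence dict plus two sequential stable sorts collapse into one in-place sort with a composite (persistence, value) key.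
import Mathlib
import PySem

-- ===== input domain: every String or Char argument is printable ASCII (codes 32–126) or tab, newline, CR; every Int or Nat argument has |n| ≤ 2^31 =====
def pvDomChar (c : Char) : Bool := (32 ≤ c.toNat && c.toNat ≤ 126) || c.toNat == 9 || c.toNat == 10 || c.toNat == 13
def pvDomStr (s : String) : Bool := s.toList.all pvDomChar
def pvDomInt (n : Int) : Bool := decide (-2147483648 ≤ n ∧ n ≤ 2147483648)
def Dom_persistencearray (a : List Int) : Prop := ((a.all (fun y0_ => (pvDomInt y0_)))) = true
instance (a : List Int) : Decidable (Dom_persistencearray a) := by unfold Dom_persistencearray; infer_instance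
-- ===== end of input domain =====

-- B replaces A's two nested while loops by the natural recurrence for persistence and
-- A's dict + two sequential stable sorts by one composite-key sort (objective: simpler).
-- Both A and B sort the caller's list in place; the equivalence proved is about the return value.
-- The while loops / recursions are ported with a Nat fuel of b.toNat + 1, which never runs out
-- (each pass strictly shrinks a positive b; proved by the *_congr / *_eq lemmas below).

-- ===== PORT A =====
-- inner while loop of A's persistence: while b > 0: p *= b % 10; b //= 10
def pvDigitLoopF : Nat → Int → Int → Int
  | 0, p, _ => p
  | f + 1, p, b =>
    if 0 < b then pvDigitLoopF f (p * PySem.Int.mod b 10) (PySem.Int.floordiv b 10) else p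

def pvDigitLoop (p b : Int) : Int := pvDigitLoopF (b.toNat + 1) p b

-- outer while loop of A's persistence: while b > 9: steps += 1; b = digit-product
def pvPersLoopF : Nat → Int → Int → Int
  | 0, s, _ => s
  | f + 1, s, b => if 9 < b then pvPersLoopF f (s + 1) (pvDigitLoop 1 b) else s

def pvPersLoop (steps b : Int) : Int := pvPersLoopF (b.toNat + 1) steps b

def persistence (a : Int) : Int := pvPersLoop 0 a

def persistencearray (a : List Int) : List Int :=
  let c := a.foldl (fun d i => d.insert i (persistence i)) PySem.Dict.empty
  let b := PySem.List.sorted a (fun i => i) false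
  PySem.List.sorted b (fun i => c.getD i 0) false

-- ===== PORT B =====
-- B's prod_digits: n if n < 10 else (n % 10) * prod_digits(n // 10)
def pvProdDigitsF : Nat → Int → Int
  | 0, n => n
  | f + 1, n =>
    if n < 10 then n else PySem.Int.mod n 10 * pvProdDigitsF f (PySem.Int.floordiv n 10)

def pvProdDigits (n : Int) : Int := pvProdDigitsF (n.toNat + 1) n

-- B's persistence: 0 if n <= 9 else 1 + persistence(prod_digits(n))
def pvPersistenceBF : Nat → Int → Int
  | 0, _ => 0
  | f + 1, n => if n ≤ 9 then 0 else 1 + pvPersistenceBF f (pvProdDigits n)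

def pvPersistenceB (n : Int) : Int := pvPersistenceBF (n.toNat + 1) n

def persistencearray_alt (a : List Int) : List Int :=
  PySem.List.sorted2 a (fun i => pvPersistenceB i) (fun i => i) false

-- ===== PRECONDITION & SPEC =====
def Spec_persistencearray (a : List Int) (out : List Int) : Prop := out = persistencearray_alt a
instance (a : List Int) (out : List Int) : Decidable (Spec_persistencearray a out) := by unfold Spec_persistencearray; infer_instance

-- ===== CLAIM (what is proved, stated in full; the proofs are below) =====
def Claim_equal_persistencearray : Prop := ∀ (a : List Int), Dom_persistencearray a → Spec_persistencearray a (persistencearray a)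

-- ===== LEMMAS AND PROOFS =====

theorem pvFloordiv10_toNat_lt (b : Int) (h : 0 < b) :
    (PySem.Int.floordiv b 10).toNat < b.toNat := by
  rw [PySem.Int.floordiv_eq_ediv_of_pos (by norm_num : (0:Int) < 10)]
  omega

-- the digit loop's value does not depend on the fuel, once the fuel is sufficient
theorem pvDigitLoopF_congr : ∀ (f f' : Nat) (p b : Int), b.toNat < f → b.toNat < f' →
    pvDigitLoopF f p b = pvDigitLoopF f' p b := by
  intro f
  induction f with
  | zero => intro f' p b h _; exact absurd h (by omega)
  | succ f ih =>
    intro f' p b h h'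
    cases f' with
    | zero => exact absurd h' (by omega)
    | succ f'' =>
      simp only [pvDigitLoopF]
      by_cases hb : 0 < b
      · simp only [if_pos hb]
        have hlt := pvFloordiv10_toNat_lt b hb
        exact ih f'' _ _ (by omega) (by omega)
      · simp [hb]

-- the loop's defining equation
theorem pvDigitLoop_eq (p b : Int) :
    pvDigitLoop p b =
      if 0 < b then pvDigitLoop (p * PySem.Int.mod b 10) (PySem.Int.floordiv b 10) else p := by
  show pvDigitLoopF (b.toNat + 1) p b = _
  simp only [pvDigitLoopF]
  by_cases hb : 0 < b
  · rw [if_pos hb, if_pos hb]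
    have hlt := pvFloordiv10_toNat_lt b hb
    exact pvDigitLoopF_congr _ _ _ _ (by omega) (by omega)
  · rw [if_neg hb, if_neg hb]

-- the accumulator factors out of the loop
theorem pvDigitLoop_mul : ∀ (m : Nat) (b p : Int), b.toNat ≤ m →
    pvDigitLoop p b = p * pvDigitLoop 1 b := by
  intro m
  induction m with
  | zero =>
    intro b p hm
    have hb : ¬ 0 < b := by omega
    conv_lhs => rw [pvDigitLoop_eq]
    conv_rhs => rw [pvDigitLoop_eq]
    simp [hb]
  | succ m ih =>
    intro b p hm
    by_cases hb : 0 < b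
    · have hlt := pvFloordiv10_toNat_lt b hb
      conv_lhs => rw [pvDigitLoop_eq]
      conv_rhs => rw [pvDigitLoop_eq]
      rw [if_pos hb, if_pos hb]
      rw [ih (PySem.Int.floordiv b 10) (p * PySem.Int.mod b 10) (by omega),
          ih (PySem.Int.floordiv b 10) (1 * PySem.Int.mod b 10) (by omega)]
      ring
    · conv_lhs => rw [pvDigitLoop_eq]
      conv_rhs => rw [pvDigitLoop_eq]
      simp [hb]

-- bounds on the digit product
theorem pvDigitLoop_bounds : ∀ (m : Nat) (b : Int), b.toNat ≤ m → 0 < b →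
    0 ≤ pvDigitLoop 1 b ∧ pvDigitLoop 1 b ≤ b ∧ (9 < b → pvDigitLoop 1 b < b) := by
  intro m
  induction m with
  | zero => intro b hm hb; exact absurd hb (by omega)
  | succ m ih =>
    intro b hm hb
    have hfd : PySem.Int.floordiv b 10 = b / 10 :=
      PySem.Int.floordiv_eq_ediv_of_pos (by norm_num)
    have hmd : PySem.Int.mod b 10 = b % 10 :=
      PySem.Int.mod_eq_emod_of_pos (by norm_num)
    have hlt := pvFloordiv10_toNat_lt b hb
    have hD : pvDigitLoop 1 b = b % 10 * pvDigitLoop 1 (b / 10) := by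
      conv_lhs => rw [pvDigitLoop_eq]
      rw [if_pos hb, pvDigitLoop_mul b.toNat _ _ (le_of_lt hlt), hfd, hmd]
      ring
    by_cases hq : 0 < b / 10
    · obtain ⟨h0, h1, _⟩ := ih (b / 10) (by rw [hfd] at hlt; omega) hq
      have key : b % 10 * pvDigitLoop 1 (b / 10) ≤ 9 * (b / 10) :=
        mul_le_mul (by omega) h1 h0 (by norm_num)
      have nn : 0 ≤ b % 10 * pvDigitLoop 1 (b / 10) := mul_nonneg (by omega) h0
      rw [hD]
      omega
    · have hq0 : b / 10 = 0 := by omega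
      have hone : pvDigitLoop 1 (b / 10) = 1 := by
        rw [hq0, pvDigitLoop_eq]
        norm_num
      rw [hD, hone, mul_one]
      omega

-- the outer loop's value does not depend on the fuel, once the fuel is sufficient
theorem pvPersLoopF_congr : ∀ (f f' : Nat) (s b : Int), b.toNat < f → b.toNat < f' →
    pvPersLoopF f s b = pvPersLoopF f' s b := by
  intro f
  induction f with
  | zero => intro f' s b h _; exact absurd h (by omega)
  | succ f ih =>
    intro f' s b h h'
    cases f' with
    | zero => exact absurd h' (by omega)
    | succ f'' =>
      simp only [pvPersLoopF]
      by_cases hb : 9 < b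
      · simp only [if_pos hb]
        obtain ⟨h0, _, h2⟩ := pvDigitLoop_bounds b.toNat b le_rfl (by omega)
        have := h2 hb
        exact ih f'' (s + 1) (pvDigitLoop 1 b) (by omega) (by omega)
      · simp [hb]

theorem pvPersLoop_eq (s b : Int) :
    pvPersLoop s b = if 9 < b then pvPersLoop (s + 1) (pvDigitLoop 1 b) else s := by
  show pvPersLoopF (b.toNat + 1) s b = _
  simp only [pvPersLoopF]
  by_cases hb : 9 < b
  · rw [if_pos hb, if_pos hb]
    obtain ⟨h0, _, h2⟩ := pvDigitLoop_bounds b.toNat b le_rfl (by omega)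
    have := h2 hb
    exact pvPersLoopF_congr _ _ _ _ (by omega) (by omega)
  · rw [if_neg hb, if_neg hb]

-- B-side: fuel-insensitivity and defining equations
theorem pvProdDigitsF_congr : ∀ (f f' : Nat) (n : Int), n.toNat < f → n.toNat < f' →
    pvProdDigitsF f n = pvProdDigitsF f' n := by
  intro f
  induction f with
  | zero => intro f' n h _; exact absurd h (by omega)
  | succ f ih =>
    intro f' n h h'
    cases f' with
    | zero => exact absurd h' (by omega)
    | succ f'' =>
      simp only [pvProdDigitsF]
      by_cases hn : n < 10
      · simp [hn]
      · simp only [if_neg hn]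
        have hlt := pvFloordiv10_toNat_lt n (by omega)
        rw [ih f'' (PySem.Int.floordiv n 10) (by omega) (by omega)]

theorem pvProdDigits_eq (n : Int) :
    pvProdDigits n =
      if n < 10 then n else PySem.Int.mod n 10 * pvProdDigits (PySem.Int.floordiv n 10) := by
  show pvProdDigitsF (n.toNat + 1) n = _
  simp only [pvProdDigitsF]
  by_cases hn : n < 10
  · rw [if_pos hn, if_pos hn]
  · rw [if_neg hn, if_neg hn]
    have hlt := pvFloordiv10_toNat_lt n (by omega)
    rw [pvProdDigitsF_congr n.toNat ((PySem.Int.floordiv n 10).toNat + 1)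
      (PySem.Int.floordiv n 10) (by omega) (by omega)]
    rfl

theorem pvProdDigits_bounds : ∀ (m : Nat) (n : Int), n.toNat ≤ m → 0 < n →
    0 ≤ pvProdDigits n ∧ pvProdDigits n ≤ n ∧ (9 < n → pvProdDigits n < n) := by
  intro m
  induction m with
  | zero => intro n hm hn; exact absurd hn (by omega)
  | succ m ih =>
    intro n hm hn
    by_cases h10 : n < 10
    · have hself : pvProdDigits n = n := by rw [pvProdDigits_eq, if_pos h10]
      rw [hself]
      omega
    · have hfd : PySem.Int.floordiv n 10 = n / 10 :=
        PySem.Int.floordiv_eq_ediv_of_pos (by norm_num)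
      have hmd : PySem.Int.mod n 10 = n % 10 :=
        PySem.Int.mod_eq_emod_of_pos (by norm_num)
      have hlt := pvFloordiv10_toNat_lt n hn
      have hP : pvProdDigits n = n % 10 * pvProdDigits (n / 10) := by
        conv_lhs => rw [pvProdDigits_eq]
        rw [if_neg h10, hfd, hmd]
      have hq : 0 < n / 10 := by omega
      obtain ⟨h0, h1, _⟩ := ih (n / 10) (by rw [hfd] at hlt; omega) hq
      have key : n % 10 * pvProdDigits (n / 10) ≤ 9 * (n / 10) :=
        mul_le_mul (by omega) h1 h0 (by norm_num)
      have nn : 0 ≤ n % 10 * pvProdDigits (n / 10) := mul_nonneg (by omega) h0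
      rw [hP]
      omega

theorem pvPersistenceBF_congr : ∀ (f f' : Nat) (n : Int), n.toNat < f → n.toNat < f' →
    pvPersistenceBF f n = pvPersistenceBF f' n := by
  intro f
  induction f with
  | zero => intro f' n h _; exact absurd h (by omega)
  | succ f ih =>
    intro f' n h h'
    cases f' with
    | zero => exact absurd h' (by omega)
    | succ f'' =>
      simp only [pvPersistenceBF]
      by_cases hn : n ≤ 9
      · simp [hn]
      · simp only [if_neg hn]
        obtain ⟨h0, _, h2⟩ := pvProdDigits_bounds n.toNat n le_rfl (by omega)
        have := h2 (by omega)
        rw [ih f'' (pvProdDigits n) (by omega) (by omega)]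

theorem pvPersistenceB_eq (n : Int) :
    pvPersistenceB n = if n ≤ 9 then 0 else 1 + pvPersistenceB (pvProdDigits n) := by
  show pvPersistenceBF (n.toNat + 1) n = _
  simp only [pvPersistenceBF]
  by_cases hn : n ≤ 9
  · rw [if_pos hn, if_pos hn]
  · rw [if_neg hn, if_neg hn]
    obtain ⟨h0, _, h2⟩ := pvProdDigits_bounds n.toNat n le_rfl (by omega)
    have := h2 (by omega)
    rw [pvPersistenceBF_congr n.toNat ((pvProdDigits n).toNat + 1)
      (pvProdDigits n) (by omega) (by omega)]
    rfl

-- A's digit loop computes B's digit product (for positive input)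
theorem pvDigitLoop_eq_prodDigits : ∀ (m : Nat) (b : Int), b.toNat ≤ m → 0 < b →
    pvDigitLoop 1 b = pvProdDigits b := by
  intro m
  induction m with
  | zero => intro b hm hb; exact absurd hb (by omega)
  | succ m ih =>
    intro b hm hb
    have hfd : PySem.Int.floordiv b 10 = b / 10 :=
      PySem.Int.floordiv_eq_ediv_of_pos (by norm_num)
    have hmd : PySem.Int.mod b 10 = b % 10 :=
      PySem.Int.mod_eq_emod_of_pos (by norm_num)
    have hlt := pvFloordiv10_toNat_lt b hb
    by_cases h10 : b < 10
    · have hq0 : PySem.Int.floordiv b 10 = 0 := by rw [hfd]; omega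
      have hD : pvDigitLoop 1 b = b % 10 := by
        conv_lhs => rw [pvDigitLoop_eq]
        rw [if_pos hb, hq0, pvDigitLoop_eq,
            if_neg (by norm_num : ¬ (0:Int) < 0), hmd]
        ring
      rw [hD, pvProdDigits_eq, if_pos h10]
      omega
    · have hD : pvDigitLoop 1 b
          = PySem.Int.mod b 10 * pvDigitLoop 1 (PySem.Int.floordiv b 10) := by
        conv_lhs => rw [pvDigitLoop_eq]
        rw [if_pos hb, pvDigitLoop_mul b.toNat _ _ (le_of_lt hlt)]
        ring
      rw [hD, ih (PySem.Int.floordiv b 10) (by omega) (by rw [hfd]; omega)]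
      conv_rhs => rw [pvProdDigits_eq]
      rw [if_neg h10]

-- A's outer loop equals steps + B's recursive persistence
theorem pvPersLoop_eq_persB : ∀ (m : Nat) (b s : Int), b.toNat ≤ m →
    pvPersLoop s b = s + pvPersistenceB b := by
  intro m
  induction m with
  | zero =>
    intro b s hm
    have h9 : ¬ 9 < b := by omega
    rw [pvPersLoop_eq, if_neg h9, pvPersistenceB_eq, if_pos (by omega : b ≤ 9)]
    ring
  | succ m ih =>
    intro b s hm
    by_cases h9 : 9 < b
    · obtain ⟨hb0, hb1, hb2⟩ := pvDigitLoop_bounds b.toNat b le_rfl (by omega)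
      have hblt := hb2 h9
      conv_lhs => rw [pvPersLoop_eq]
      rw [if_pos h9]
      rw [pvDigitLoop_eq_prodDigits b.toNat b le_rfl (by omega)] at hb0 hblt ⊢
      rw [ih (pvProdDigits b) (s + 1) (by omega)]
      conv_rhs => rw [pvPersistenceB_eq]
      rw [if_neg (by omega : ¬ b ≤ 9)]
      ring
    · rw [pvPersLoop_eq, if_neg h9, pvPersistenceB_eq, if_pos (by omega : b ≤ 9)]
      ring

theorem persistence_eq_alt (n : Int) : persistence n = pvPersistenceB n := by
  have := pvPersLoop_eq_persB n.toNat n 0 le_rfl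
  simpa [persistence] using this

-- the dict A builds maps every member of the list to its persistence
theorem pvDict_getD : ∀ (l : List Int) (d : PySem.Dict Int Int) (j : Int),
    (j ∈ l ∨ d.getD j 0 = persistence j) →
    (l.foldl (fun d i => d.insert i (persistence i)) d).getD j 0 = persistence j := by
  intro l
  induction l with
  | nil => intro d j h; simpa using h.elim (by simp) id
  | cons i l ih =>
    intro d j h
    simp only [List.foldl_cons]
    apply ih
    by_cases hji : j = i
    · right; rw [PySem.Dict.getD_insert]; simp [hji]
    · rcases h with h | h
      · rcases List.mem_cons.mp h with h | h
        · exact absurd h hji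
        · exact Or.inl h
      · right; rw [PySem.Dict.getD_insert]; simp [hji, h]

-- the target order: persistence first, then value
def pvLeK (k : Int → Int) (x y : Int) : Prop := k x < k y ∨ (k x = k y ∧ x ≤ y)

-- stable insertion by key k into a pvLeK-sorted list, when x is ≥ all present values
theorem pvInsertA (k : Int → Int) (x : Int) : ∀ (acc : List Int),
    acc.Pairwise (pvLeK k) → (∀ z ∈ acc, z ≤ x) →
    (PySem.List.insertBy (fun a b => decide (k a < k b)) x acc).Pairwise (pvLeK k) := by
  intro acc
  induction acc with
  | nil => intro _ _; simp [PySem.List.insertBy]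
  | cons y ys ih =>
    intro hp hle
    rw [PySem.List.insertBy]
    by_cases hxy : k x < k y
    · rw [if_pos (by simpa using hxy)]
      refine List.Pairwise.cons ?_ hp
      intro z hz
      rcases List.mem_cons.mp hz with rfl | hz
      · exact Or.inl hxy
      · have h2 := (List.pairwise_cons.mp hp).1 z hz
        unfold pvLeK at h2 ⊢
        omega
    · rw [if_neg (by simpa using hxy)]
      refine List.Pairwise.cons ?_ (ih (List.pairwise_cons.mp hp).2
        (fun z hz => hle z (List.mem_cons_of_mem y hz)))
      intro z hz
      rcases (PySem.List.insertBy_mem_iff _ _ _ _).mp hz with rfl | hz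
      · have hyx := hle y (by simp)
        unfold pvLeK
        omega
      · exact (List.pairwise_cons.mp hp).1 z hz

theorem pvFoldA (k : Int → Int) : ∀ (xs acc : List Int),
    xs.Pairwise (· ≤ ·) → acc.Pairwise (pvLeK k) → (∀ z ∈ acc, ∀ w ∈ xs, z ≤ w) →
    (xs.foldl (fun acc x => PySem.List.insertBy (fun a b => decide (k a < k b)) x acc) acc).Pairwise (pvLeK k) := by
  intro xs
  induction xs with
  | nil => intro acc _ hp _; simpa using hp
  | cons x xs ih =>
    intro acc hxs hp hle
    simp only [List.foldl_cons]
    apply ih _ (List.pairwise_cons.mp hxs).2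
    · exact pvInsertA k x acc hp (fun z hz => hle z hz x (by simp))
    · intro z hz w hw
      rcases (PySem.List.insertBy_mem_iff _ _ _ _).mp hz with rfl | hz
      · exact (List.pairwise_cons.mp hxs).1 w hw
      · exact hle z hz w (List.mem_cons_of_mem x hw)

-- insertion by the composite (k, id) strict order preserves pvLeK-sortedness
theorem pvInsertB (k : Int → Int) (x : Int) : ∀ (acc : List Int),
    acc.Pairwise (pvLeK k) →
    (PySem.List.insertBy
      (fun a b => decide (k a < k b) || (!decide (k b < k a) && decide (a < b))) x acc).Pairwise (pvLeK k) := by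
  intro acc
  induction acc with
  | nil => intro _; simp [PySem.List.insertBy]
  | cons y ys ih =>
    intro hp
    by_cases hxy : k x < k y ∨ (¬ k y < k x ∧ x < y)
    · rw [PySem.List.insertBy, if_pos (by
        simp only [Bool.or_eq_true, Bool.and_eq_true, Bool.not_eq_true',
          decide_eq_true_iff, decide_eq_false_iff_not]
        exact hxy)]
      refine List.Pairwise.cons ?_ hp
      intro z hz
      rcases List.mem_cons.mp hz with rfl | hz
      · unfold pvLeK
        omega
      · have h2 := (List.pairwise_cons.mp hp).1 z hz
        unfold pvLeK at h2 ⊢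
        omega
    · rw [PySem.List.insertBy, if_neg (by
        simp only [Bool.or_eq_true, Bool.and_eq_true, Bool.not_eq_true',
          decide_eq_true_iff, decide_eq_false_iff_not]
        exact hxy)]
      refine List.Pairwise.cons ?_ (ih (List.pairwise_cons.mp hp).2)
      intro z hz
      rcases (PySem.List.insertBy_mem_iff _ _ _ _).mp hz with rfl | hz
      · have hnlt : ¬ k z < k y := fun h => hxy (Or.inl h)
        unfold pvLeK
        by_cases h1 : k y < k z
        · exact Or.inl h1
        · have h2 : ¬ z < y := fun hlt => hxy (Or.inr ⟨h1, hlt⟩)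
          omega
      · exact (List.pairwise_cons.mp hp).1 z hz

theorem pvFoldB (k : Int → Int) : ∀ (xs acc : List Int),
    acc.Pairwise (pvLeK k) →
    (xs.foldl (fun acc x => PySem.List.insertBy
      (fun a b => decide (k a < k b) || (!decide (k b < k a) && decide (a < b))) x acc) acc).Pairwise (pvLeK k) := by
  intro xs
  induction xs with
  | nil => intro acc hp; simpa using hp
  | cons x xs ih =>
    intro acc hp
    simp only [List.foldl_cons]
    exact ih _ (pvInsertB k x acc hp)

-- ===== VERDICT (by name: the statement is the Claim_ definition above) =====
theorem persistencearray_spec : Claim_equal_persistencearray := by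
  intro a _
  unfold Spec_persistencearray persistencearray persistencearray_alt
  set c := a.foldl (fun d i => d.insert i (persistence i)) PySem.Dict.empty with hc
  -- A's result is pairwise in the lex (persistence, value) order
  have hA : (PySem.List.sorted (PySem.List.sorted a (fun i => i) false)
      (fun i => c.getD i 0) false).Pairwise (pvLeK pvPersistenceB) := by
    have h1 : (PySem.List.sorted (PySem.List.sorted a (fun i => i) false)
        (fun i => c.getD i 0) false).Pairwise (pvLeK (fun i => c.getD i 0)) := by
      rw [PySem.List.sorted_eq_foldl_insertBy]
      apply pvFoldA
      · exact PySem.List.sorted_pairwise a (fun i => i)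
      · exact List.Pairwise.nil
      · intro z hz; simp at hz
    refine h1.imp_of_mem ?_
    intro u v hu hv huv
    have hu' : u ∈ a := (PySem.List.mem_sorted a _ _ _).mp
      ((PySem.List.mem_sorted _ _ _ _).mp hu)
    have hv' : v ∈ a := (PySem.List.mem_sorted a _ _ _).mp
      ((PySem.List.mem_sorted _ _ _ _).mp hv)
    have hcu : c.getD u 0 = persistence u := pvDict_getD a PySem.Dict.empty u (Or.inl hu')
    have hcv : c.getD v 0 = persistence v := pvDict_getD a PySem.Dict.empty v (Or.inl hv')
    simp only [pvLeK] at huv ⊢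
    rw [hcu, hcv] at huv
    simp only [persistence_eq_alt] at huv
    exact huv
  -- B's result is pairwise in the same order
  have hB : (PySem.List.sorted2 a (fun i => pvPersistenceB i) (fun i => i) false).Pairwise
      (pvLeK pvPersistenceB) := by
    show (List.foldl _ [] a).Pairwise (pvLeK pvPersistenceB)
    exact pvFoldB pvPersistenceB a [] List.Pairwise.nil
  -- both results are permutations of the input
  have hpA : (PySem.List.sorted (PySem.List.sorted a (fun i => i) false)
      (fun i => c.getD i 0) false).Perm a :=
    (PySem.List.sorted_perm _ _ _).trans (PySem.List.sorted_perm _ _ _)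
  have hpB : (PySem.List.sorted2 a (fun i => pvPersistenceB i) (fun i => i) false).Perm a :=
    PySem.List.sorted2_perm _ _ _ _
  exact List.eq_of_perm_of_sorted
    (fun u v _ _ h1 h2 => by unfold pvLeK at h1 h2; omega)
    hA hB (hpA.trans hpB.symm)
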